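-- pv_equiv track=rewrite | github.com/breezy1812/toolset | 06_monthly_report/Monthlyreport_01.py | available_HR
-- ===== SOURCE A (Python) =====
-- def available_HR(goldenHR_list):
--     # 移除 0 or -1
--     target1 = -1
--     while(target1 in goldenHR_list):
--         goldenHR_list.remove(target1)
--     target2 = 0
--     while(target2 in goldenHR_list):
--         goldenHR_list.remove(target2)
--     target3 = None
--     while(target3 in goldenHR_list):
--         goldenHR_list.remove(target3)
--     return goldenHR_list
-- ===== SOURCE B (Python) =====
-- def available_HR(goldenHR_list):
--     # one filtering pass; mutates the same list object in place (like A) and returns it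
--     goldenHR_list[:] = [x for x in goldenHR_list if x != -1 and x != 0 and x is not None]
--     return goldenHR_list
-- ===== Notes on version B (the rewrite author's own statement) =====
-- stated objective: faster
-- what changed: A repeatedly scans the list and removes one occurrence at a time in three while-loops; B builds the kept elements in a single comprehension pass and slice-assigns them back into the same list object.
import Mathlib
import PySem

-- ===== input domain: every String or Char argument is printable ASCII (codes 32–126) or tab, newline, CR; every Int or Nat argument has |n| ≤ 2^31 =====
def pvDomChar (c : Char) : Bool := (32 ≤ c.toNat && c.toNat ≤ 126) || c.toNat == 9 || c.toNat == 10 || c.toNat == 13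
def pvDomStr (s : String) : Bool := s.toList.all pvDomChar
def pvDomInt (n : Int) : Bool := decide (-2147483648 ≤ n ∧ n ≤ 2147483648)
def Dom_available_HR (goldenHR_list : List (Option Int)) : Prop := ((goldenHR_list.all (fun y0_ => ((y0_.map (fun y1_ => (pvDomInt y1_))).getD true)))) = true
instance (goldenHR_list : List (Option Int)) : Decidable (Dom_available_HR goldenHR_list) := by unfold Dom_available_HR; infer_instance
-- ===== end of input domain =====

-- B replaces A's three repeated scan-and-remove while-loops with a single filtering pass
-- slice-assigned back into the same list (both mutate the argument in place; the equivalence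
-- proved here is about the returned value, which is the mutated list in both).
-- ===== PORT A =====
-- `while target in lst: lst.remove(target)` — repeat removing the first occurrence while present
def pvRemoveLoop (t : Option Int) (xs : List (Option Int)) : List (Option Int) :=
  if h : t ∈ xs then
    match hr : PySem.List.remove? xs t with
    | some ys => pvRemoveLoop t ys
    | none => xs
  else xs
termination_by xs.length
decreasing_by
  have : PySem.List.remove? xs t = some (xs.erase t) := PySem.List.remove?_eq_some_erase xs t h
  rw [this] at hr
  cases hr
  have := List.length_erase_of_mem h
  have hx : 0 < xs.length := List.length_pos_of_mem h
  omega

def available_HR (goldenHR_list : List (Option Int)) : List (Option Int) :=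
  let afterT1 := pvRemoveLoop (some (-1)) goldenHR_list
  let afterT2 := pvRemoveLoop (some 0) afterT1
  let afterT3 := pvRemoveLoop none afterT2
  afterT3

-- ===== PORT B =====
-- `[x for x in goldenHR_list if x != -1 and x != 0 and x is not None]`
def available_HR_alt (goldenHR_list : List (Option Int)) : List (Option Int) :=
  goldenHR_list.filter (fun x => decide (x ≠ some (-1)) && decide (x ≠ some 0) && decide (x ≠ none))

-- ===== PRECONDITION & SPEC =====
def Spec_available_HR (goldenHR_list : List (Option Int)) (out : List (Option Int)) : Prop := out = available_HR_alt goldenHR_list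
instance (goldenHR_list : List (Option Int)) (out : List (Option Int)) : Decidable (Spec_available_HR goldenHR_list out) := by unfold Spec_available_HR; infer_instance

-- ===== CLAIM (what is proved, stated in full; the proofs are below) =====
def Claim_equal_available_HR : Prop := ∀ (goldenHR_list : List (Option Int)), Dom_available_HR goldenHR_list → Spec_available_HR goldenHR_list (available_HR goldenHR_list)

-- ===== LEMMAS AND PROOFS =====

-- ===== VERDICT (by name: the statement is the Claim_ definition above) =====
-- filtering away t commutes with erasing the first t
theorem pvFilterErase (t : Option Int) (xs : List (Option Int)) :
    (xs.erase t).filter (fun x => decide (x ≠ t)) = xs.filter (fun x => decide (x ≠ t)) := by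
  induction xs with
  | nil => simp
  | cons a xs ih =>
    by_cases h : a = t
    · subst h; simp
    · have ih' := ih
      simp only [ne_eq, decide_not] at ih'
      simp [h, ih']

theorem pvRemoveLoop_eq_filter (t : Option Int) (xs : List (Option Int)) :
    pvRemoveLoop t xs = xs.filter (fun x => decide (x ≠ t)) := by
  induction hn : xs.length using Nat.strong_induction_on generalizing xs with
  | _ n ih =>
    subst hn
    rw [pvRemoveLoop.eq_def]
    by_cases h : t ∈ xs
    · have hr : PySem.List.remove? xs t = some (xs.erase t) :=
        PySem.List.remove?_eq_some_erase xs t h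
      simp only [h, dif_pos]
      split
      case _ ys hy =>
        rw [hr] at hy
        cases hy
        rw [ih (xs.erase t).length
              (by have := List.length_erase_of_mem h; have := List.length_pos_of_mem h; omega)
              (xs.erase t) rfl]
        exact pvFilterErase t xs
      case _ hy =>
        rw [hr] at hy
        cases hy
    · simp only [h, dif_neg, not_false_iff]
      symm
      apply List.filter_eq_self.mpr
      intro a ha
      simp only [decide_eq_true_eq, ne_eq]
      rintro rfl
      exact h ha

theorem available_HR_spec : Claim_equal_available_HR := by
  intro g _
  unfold Spec_available_HR available_HR available_HR_alt
  simp only [pvRemoveLoop_eq_filter, List.filter_filter]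
  apply List.filter_congr
  intro a _
  cases a <;> simp [Bool.and_comm]
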